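-- pv_equiv track=rewrite | github.com/Abilityai/agent-corbin | scripts/contact-enrichment/enrich_email_collaborators_mcp.py | parse_email_messages
-- ===== SOURCE A (Python) =====
-- def parse_email_messages(messages_text: str):
--     """Parse messages from MCP batch retrieval output"""
--     # This would parse the output from mcp__google_workspace__get_gmail_messages_content_batch
--     # For now, return parsed structure
--
--     # Messages are in format:
--     # === Message 1/N ===
--     # Message ID: xyz
--     # Thread ID: abc
--     # From: Name <email>
--     # Subject: ...
--     # Date: ...
--
--     messages = []
--     current_msg = {}
--
--     for line in messages_text.split('\n'):
--         if line.startswith('=== Message'):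
--             if current_msg:
--                 messages.append(current_msg)
--             current_msg = {}
--         elif line.startswith('From:'):
--             current_msg['from'] = line.replace('From:', '').strip()
--         elif line.startswith('Subject:'):
--             current_msg['subject'] = line.replace('Subject:', '').strip()
--
--     if current_msg:
--         messages.append(current_msg)
--
--     return messages
-- ===== SOURCE B (Python) =====
-- def parse_email_messages(messages_text: str):
--     """Parse messages from MCP batch retrieval output (segment-splitting rewrite)."""
--     lines = messages_text.split('\n')
--     # positions of delimiter lines
--     cuts = [i for i, l in enumerate(lines) if l.startswith('=== Message')]
--     starts = [0] + [c + 1 for c in cuts]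
--     ends = cuts + [len(lines)]
--     messages = []
--     for s, e in zip(starts, ends):
--         msg = {}
--         for l in lines[s:e]:
--             if l.startswith('From:'):
--                 msg['from'] = l.replace('From:', '').strip()
--             elif l.startswith('Subject:'):
--                 msg['subject'] = l.replace('Subject:', '').strip()
--         if msg:
--             messages.append(msg)
--     return messages
-- ===== Notes on version B (the rewrite author's own statement) =====
-- stated objective: alternative
-- what changed: Instead of one stateful line loop flushing a current dict at each delimiter, B first computes the delimiter positions and splits the line list into segments by index slicing, then builds each segment's dict in an independent inner pass and keeps the nonempty ones.
import Mathlib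
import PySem

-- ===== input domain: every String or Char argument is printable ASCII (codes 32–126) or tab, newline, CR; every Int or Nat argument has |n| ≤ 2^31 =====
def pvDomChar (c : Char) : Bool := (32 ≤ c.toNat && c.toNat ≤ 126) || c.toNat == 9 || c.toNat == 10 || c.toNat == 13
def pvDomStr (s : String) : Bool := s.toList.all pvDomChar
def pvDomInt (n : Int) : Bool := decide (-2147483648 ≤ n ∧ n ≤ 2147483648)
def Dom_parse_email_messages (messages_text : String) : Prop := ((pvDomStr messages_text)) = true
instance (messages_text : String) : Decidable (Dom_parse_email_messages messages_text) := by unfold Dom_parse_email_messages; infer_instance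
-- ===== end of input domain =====

-- B is an alternative decomposition of the same parse: split at delimiter positions first, then one independent pass per segment.

-- ===== PORT A =====
-- single stateful pass: flush current_msg at each '=== Message' delimiter, last-wins field updates
def parse_email_messages (messages_text : String) : List (List (String × String)) :=
  let fin := (((PySem.Str.split? messages_text "\n").getD [])).foldl
    (fun (st : List (PySem.Dict String String) × PySem.Dict String String) (line : String) =>
      if PySem.Str.startswith line "=== Message" then
        ((if st.2.items ≠ [] then st.1 ++ [st.2] else st.1), PySem.Dict.empty)
      else if PySem.Str.startswith line "From:" then
        (st.1, st.2.insert "from" (PySem.Str.strip (PySem.Str.replace line "From:" "")))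
      else if PySem.Str.startswith line "Subject:" then
        (st.1, st.2.insert "subject" (PySem.Str.strip (PySem.Str.replace line "Subject:" "")))
      else st)
    ([], PySem.Dict.empty)
  (if fin.2.items ≠ [] then fin.1 ++ [fin.2] else fin.1).map (fun d => d.items)

-- ===== PORT B =====
-- compute delimiter positions, slice the line list into segments, build each segment's dict independently
def parse_email_messages_alt (messages_text : String) : List (List (String × String)) :=
  let lines := ((PySem.Str.split? messages_text "\n").getD [])
  let cuts := ((PySem.List.enumerate lines 0).filter
      (fun p => PySem.Str.startswith p.2 "=== Message")).map (fun p => p.1)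
  let starts := (0 : Int) :: cuts.map (fun c => c + 1)
  let ends := cuts ++ [(lines.length : Int)]
  ((starts.zip ends).foldl
    (fun (acc : List (PySem.Dict String String)) se =>
      let msg := (PySem.List.slice lines (some se.1) (some se.2)).foldl
        (fun (m : PySem.Dict String String) l =>
          if PySem.Str.startswith l "From:" then
            m.insert "from" (PySem.Str.strip (PySem.Str.replace l "From:" ""))
          else if PySem.Str.startswith l "Subject:" then
            m.insert "subject" (PySem.Str.strip (PySem.Str.replace l "Subject:" ""))
          else m)
        PySem.Dict.empty
      if msg.items ≠ [] then acc ++ [msg] else acc)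
    []).map (fun d => d.items)

-- ===== PRECONDITION & SPEC =====
def Spec_parse_email_messages (messages_text : String) (out : List (List (String × String))) : Prop := out = parse_email_messages_alt messages_text
instance (messages_text : String) (out : List (List (String × String))) : Decidable (Spec_parse_email_messages messages_text out) := by unfold Spec_parse_email_messages; infer_instance

-- ===== CLAIM (what is proved, stated in full; the proofs are below) =====
def Claim_equal_parse_email_messages : Prop := ∀ (messages_text : String), Dom_parse_email_messages messages_text → Spec_parse_email_messages messages_text (parse_email_messages messages_text)

-- ===== LEMMAS AND PROOFS =====

-- shared vocabulary of the proof
def pvDelim (l : String) : Bool := PySem.Str.startswith l "=== Message"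

def pvField (m : PySem.Dict String String) (l : String) : PySem.Dict String String :=
  if PySem.Str.startswith l "From:" then
    m.insert "from" (PySem.Str.strip (PySem.Str.replace l "From:" ""))
  else if PySem.Str.startswith l "Subject:" then
    m.insert "subject" (PySem.Str.strip (PySem.Str.replace l "Subject:" ""))
  else m

def pvStepA (st : List (PySem.Dict String String) × PySem.Dict String String) (line : String) :
    List (PySem.Dict String String) × PySem.Dict String String :=
  if PySem.Str.startswith line "=== Message" then
    ((if st.2.items ≠ [] then st.1 ++ [st.2] else st.1), PySem.Dict.empty)
  else if PySem.Str.startswith line "From:" then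
    (st.1, st.2.insert "from" (PySem.Str.strip (PySem.Str.replace line "From:" "")))
  else if PySem.Str.startswith line "Subject:" then
    (st.1, st.2.insert "subject" (PySem.Str.strip (PySem.Str.replace line "Subject:" "")))
  else st

theorem pvStepA_delim {line : String} (hd : pvDelim line = true)
    (st : List (PySem.Dict String String) × PySem.Dict String String) :
    pvStepA st line = ((if st.2.items ≠ [] then st.1 ++ [st.2] else st.1), PySem.Dict.empty) := by
  unfold pvStepA
  rw [if_pos (show PySem.Str.startswith line "=== Message" = true from hd)]

theorem pvStepA_nodelim {line : String} (hd : ¬ pvDelim line = true)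
    (st : List (PySem.Dict String String) × PySem.Dict String String) :
    pvStepA st line = (st.1, pvField st.2 line) := by
  unfold pvStepA pvField
  rw [if_neg (show ¬ PySem.Str.startswith line "=== Message" = true from hd)]
  split_ifs <;> rfl

def pvSeg (cur : PySem.Dict String String) (seg : List String) : PySem.Dict String String :=
  seg.foldl pvField cur

-- delimiter positions
def pvCuts : List String → List Nat
  | [] => []
  | l :: ls => if pvDelim l then 0 :: (pvCuts ls).map (· + 1) else (pvCuts ls).map (· + 1)

-- recursive segmentation (blocks between delimiter lines, preamble first)
def pvSegs : List String → List (List String)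
  | [] => [[]]
  | l :: ls =>
    if pvDelim l then [] :: pvSegs ls
    else
      match pvSegs ls with
      | [] => [[l]]
      | s :: rest => (l :: s) :: rest

def pvSegsOf (lines : List String) (c : List Nat) : List (List String) :=
  (((0 :: c.map (· + 1)).zip (c ++ [lines.length])).map
    (fun p => (lines.drop p.1).take (p.2 - p.1)))

theorem pvSegs_ne_nil (ls : List String) : pvSegs ls ≠ [] := by
  cases ls with
  | nil => simp [pvSegs]
  | cons l ls =>
    simp only [pvSegs]
    split
    · simp
    · cases h : pvSegs ls <;> simp

-- A's fold, characterized by segments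
theorem pvA_char (lines : List String) :
    ∀ (ms : List (PySem.Dict String String)) (cur : PySem.Dict String String),
    (if (lines.foldl pvStepA (ms, cur)).2.items ≠ [] then
        (lines.foldl pvStepA (ms, cur)).1 ++ [(lines.foldl pvStepA (ms, cur)).2]
      else (lines.foldl pvStepA (ms, cur)).1)
    = ms ++ ((match pvSegs lines with
              | [] => []
              | s :: rest => pvSeg cur s :: rest.map (pvSeg PySem.Dict.empty)).filter
              (fun d => d.items ≠ [])) := by
  induction lines with
  | nil =>
    intro ms cur
    simp only [pvSegs, List.foldl_nil, pvSeg, List.map_nil, List.filter]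
    split <;> simp_all
  | cons l ls ih =>
    intro ms cur
    simp only [List.foldl_cons, pvSegs]
    by_cases hd : pvDelim l
    · rw [pvStepA_delim hd, ih]
      have hsegs : ∀ segs : List (List String),
          (match segs with
           | [] => []
           | s :: rest => pvSeg PySem.Dict.empty s :: rest.map (pvSeg PySem.Dict.empty))
          = segs.map (pvSeg PySem.Dict.empty) := by
        intro segs; cases segs <;> simp
      rw [hsegs]
      cases hs : pvSegs ls with
      | nil => exact absurd hs (pvSegs_ne_nil ls)
      | cons s rest =>
        simp only [hd, if_true, List.map_cons, List.filter_cons, pvSeg, List.foldl_nil]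
        split <;> simp_all [List.append_assoc]
    · rw [pvStepA_nodelim hd, ih]
      cases hs : pvSegs ls with
      | nil => exact absurd hs (pvSegs_ne_nil ls)
      | cons s rest =>
        simp [hd, pvSeg]

-- enumerate-based cuts agree with pvCuts
theorem pvCuts_char (lines : List String) :
    ∀ (s : Int),
    ((PySem.List.enumerate lines s).filter (fun p => pvDelim p.2)).map (fun p => p.1)
    = (pvCuts lines).map (fun (k : Nat) => ((k : Int) + s)) := by
  induction lines with
  | nil => intro s; simp [PySem.List.enumerate_nil, pvCuts]
  | cons l ls ih =>
    intro s
    rw [PySem.List.enumerate_cons]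
    simp only [pvCuts]
    by_cases hd : pvDelim l
    · rw [List.filter_cons_of_pos (by simpa using hd), List.map_cons, ih (s + 1), if_pos hd,
        List.map_cons, List.map_map]
      refine List.cons_eq_cons.mpr ⟨by norm_num, ?_⟩
      apply List.map_congr_left; intro k _
      simp only [Function.comp_apply]; push_cast; ring
    · rw [List.filter_cons_of_neg (by simpa using hd), ih (s + 1), if_neg hd, List.map_map]
      apply List.map_congr_left; intro k _
      simp only [Function.comp_apply]; push_cast; ring

-- shift a segment list by one line
theorem pvShift (l : String) (ls : List String) (ps : List (Nat × Nat)) :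
    (ps.map (Prod.map (· + 1) (· + 1))).map (fun p => ((l :: ls).drop p.1).take (p.2 - p.1))
    = ps.map (fun p => (ls.drop p.1).take (p.2 - p.1)) := by
  rw [List.map_map]
  apply List.map_congr_left
  intro p _
  obtain ⟨a, b⟩ := p
  simp only [Function.comp_apply, Prod.map_apply]
  rw [List.drop_succ_cons]
  congr 1
  omega

-- one delimiter step of the index-slicing segmentation
theorem pvSegsOf_cons_delim (l : String) (ls : List String) (c : List Nat) :
    pvSegsOf (l :: ls) (0 :: c.map (· + 1)) = [] :: pvSegsOf ls c := by
  unfold pvSegsOf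
  rw [List.length_cons, List.map_cons, List.cons_append, List.zip_cons_cons, List.map_cons]
  refine List.cons_eq_cons.mpr ⟨by simp, ?_⟩
  have h3 : ((0 : Nat) + 1) :: (c.map (· + 1)).map (· + 1)
      = (0 :: c.map (· + 1)).map (· + 1) := by simp
  have h4 : (c.map (· + 1)) ++ [ls.length + 1] = (c ++ [ls.length]).map (· + 1) := by simp
  rw [h3, h4, List.zip_map, pvShift]

-- one ordinary-line step of the index-slicing segmentation
theorem pvSegsOf_cons_nodelim (l : String) (ls : List String) (c : List Nat) :
    pvSegsOf (l :: ls) (c.map (· + 1))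
    = (l :: (pvSegsOf ls c).headD []) :: (pvSegsOf ls c).tail := by
  cases c with
  | nil => simp [pvSegsOf, List.take_succ_cons]
  | cons a c' =>
    unfold pvSegsOf
    simp only [List.map_cons, List.cons_append, List.zip_cons_cons, List.map_cons,
      List.headD_cons, List.tail_cons, List.length_cons]
    refine List.cons_eq_cons.mpr ⟨by simp [List.take_succ_cons], ?_⟩
    have h3 : (a + 1 + 1) :: (c'.map (· + 1)).map (· + 1)
        = ((a + 1) :: c'.map (· + 1)).map (· + 1) := by simp
    have h4 : (c'.map (· + 1)) ++ [ls.length + 1] = (c' ++ [ls.length]).map (· + 1) := by simp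
    rw [h3, h4]
    have h5 : ((a + 1) :: c'.map (· + 1)) = (a :: c').map (· + 1) := by simp
    rw [h5, List.zip_map, pvShift]

-- index slicing reproduces the recursive segmentation
theorem pvSegsOf_char (lines : List String) : pvSegsOf lines (pvCuts lines) = pvSegs lines := by
  induction lines with
  | nil => simp [pvSegsOf, pvCuts, pvSegs]
  | cons l ls ih =>
    by_cases hd : pvDelim l
    · rw [show pvCuts (l :: ls) = 0 :: (pvCuts ls).map (· + 1) from by simp [pvCuts, hd],
        pvSegsOf_cons_delim, ih]
      simp [pvSegs, hd]
    · rw [show pvCuts (l :: ls) = (pvCuts ls).map (· + 1) from by simp [pvCuts, hd],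
        pvSegsOf_cons_nodelim, ih]
      cases hs : pvSegs ls with
      | nil => exact absurd hs (pvSegs_ne_nil ls)
      | cons seg rest => simp [pvSegs, hd, hs]

-- conditional-append fold is map + filter
theorem pvFoldPush {α : Type} (f : α → PySem.Dict String String) :
    ∀ (ps : List α) (acc : List (PySem.Dict String String)),
    ps.foldl (fun acc se =>
        let msg := f se
        if msg.items ≠ [] then acc ++ [msg] else acc) acc
    = acc ++ (ps.map f).filter (fun d => d.items ≠ []) := by
  intro ps
  induction ps with
  | nil => intro acc; simp
  | cons p ps ih =>
    intro acc
    simp only [List.foldl_cons, List.map_cons, List.filter_cons]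
    split
    · rw [ih]; simp_all [List.append_assoc]
    · rw [ih]; simp_all

-- the two ports, zeta-expanded (proof vocabulary only)
def pvAexp (lines : List String) : List (List (String × String)) :=
  (if (lines.foldl pvStepA ([], PySem.Dict.empty)).2.items ≠ [] then
      (lines.foldl pvStepA ([], PySem.Dict.empty)).1 ++ [(lines.foldl pvStepA ([], PySem.Dict.empty)).2]
    else (lines.foldl pvStepA ([], PySem.Dict.empty)).1).map (fun d => d.items)

def pvBexp (lines : List String) : List (List (String × String)) :=
  ((((0 : Int) :: (((PySem.List.enumerate lines 0).filter
        (fun p => PySem.Str.startswith p.2 "=== Message")).map (fun p => p.1)).map (fun c => c + 1)).zip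
      ((((PySem.List.enumerate lines 0).filter
        (fun p => PySem.Str.startswith p.2 "=== Message")).map (fun p => p.1)) ++ [(lines.length : Int)])).foldl
    (fun (acc : List (PySem.Dict String String)) se =>
      let msg := (PySem.List.slice lines (some se.1) (some se.2)).foldl
        (fun (m : PySem.Dict String String) l =>
          if PySem.Str.startswith l "From:" then
            m.insert "from" (PySem.Str.strip (PySem.Str.replace l "From:" ""))
          else if PySem.Str.startswith l "Subject:" then
            m.insert "subject" (PySem.Str.strip (PySem.Str.replace l "Subject:" ""))
          else m)
        PySem.Dict.empty
      if msg.items ≠ [] then acc ++ [msg] else acc)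
    []).map (fun d => d.items)

theorem pvA_unfold (messages_text : String) :
    parse_email_messages messages_text = pvAexp ((PySem.Str.split? messages_text "\n").getD []) := rfl

theorem pvB_unfold (messages_text : String) :
    parse_email_messages_alt messages_text = pvBexp ((PySem.Str.split? messages_text "\n").getD []) := rfl

-- B computes the filtered per-segment dicts
theorem pvB_char (lines : List String) :
    pvBexp lines
    = (((pvSegs lines).map (pvSeg PySem.Dict.empty)).filter
        (fun d => d.items ≠ [])).map (fun d => d.items) := by
  unfold pvBexp
  have hcuts : ((PySem.List.enumerate lines 0).filter
      (fun p => PySem.Str.startswith p.2 "=== Message")).map (fun p => p.1)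
      = (pvCuts lines).map (fun (k : Nat) => ((k : Int))) := by
    have := pvCuts_char lines 0
    simpa [pvDelim] using this
  rw [hcuts]
  have hzip : (((0 : Int) :: ((pvCuts lines).map (fun (k : Nat) => ((k : Int)))).map (fun c => c + 1)).zip
        (((pvCuts lines).map (fun (k : Nat) => ((k : Int)))) ++ [(lines.length : Int)]))
      = ((0 :: (pvCuts lines).map (· + 1)).zip ((pvCuts lines) ++ [lines.length])).map
        (Prod.map (fun (k : Nat) => ((k : Int))) (fun (k : Nat) => ((k : Int)))) := by
    have h1 : ((0 : Int) :: ((pvCuts lines).map (fun (k : Nat) => ((k : Int)))).map (fun c => c + 1))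
        = (0 :: (pvCuts lines).map (· + 1)).map (fun (k : Nat) => ((k : Int))) := by
      simp [List.map_map]
    have h2 : (((pvCuts lines).map (fun (k : Nat) => ((k : Int)))) ++ [(lines.length : Int)])
        = ((pvCuts lines) ++ [lines.length]).map (fun (k : Nat) => ((k : Int))) := by simp
    rw [h1, h2, List.zip_map]
  rw [hzip]
  rw [pvFoldPush (fun se : Int × Int =>
      (PySem.List.slice lines (some se.1) (some se.2)).foldl
        (fun (m : PySem.Dict String String) l =>
          if PySem.Str.startswith l "From:" then
            m.insert "from" (PySem.Str.strip (PySem.Str.replace l "From:" ""))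
          else if PySem.Str.startswith l "Subject:" then
            m.insert "subject" (PySem.Str.strip (PySem.Str.replace l "Subject:" ""))
          else m)
        PySem.Dict.empty)]
  rw [List.nil_append, List.map_map]
  have hseg : (((0 :: (pvCuts lines).map (· + 1)).zip ((pvCuts lines) ++ [lines.length])).map
      ((fun se : Int × Int =>
        (PySem.List.slice lines (some se.1) (some se.2)).foldl
          (fun (m : PySem.Dict String String) l =>
            if PySem.Str.startswith l "From:" then
              m.insert "from" (PySem.Str.strip (PySem.Str.replace l "From:" ""))
            else if PySem.Str.startswith l "Subject:" then
              m.insert "subject" (PySem.Str.strip (PySem.Str.replace l "Subject:" ""))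
            else m)
          PySem.Dict.empty) ∘ (Prod.map (fun (k : Nat) => ((k : Int))) (fun (k : Nat) => ((k : Int))))))
      = (pvSegsOf lines (pvCuts lines)).map (pvSeg PySem.Dict.empty) := by
    unfold pvSegsOf
    rw [List.map_map]
    apply List.map_congr_left
    intro p _
    obtain ⟨a, b⟩ := p
    simp only [Function.comp_apply, Prod.map_apply, PySem.List.slice_natCast]
    rfl
  rw [hseg, pvSegsOf_char]

-- every segment list from pvSegs processed from the empty dict is a plain map
theorem pvMatch_map (segs : List (List String)) :
    (match segs with
     | [] => []
     | s :: rest => pvSeg PySem.Dict.empty s :: rest.map (pvSeg PySem.Dict.empty))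
    = segs.map (pvSeg PySem.Dict.empty) := by
  cases segs <;> simp

-- ===== VERDICT (by name: the statement is the Claim_ definition above) =====
theorem parse_email_messages_spec : Claim_equal_parse_email_messages := by
  intro messages_text _
  unfold Spec_parse_email_messages
  rw [pvA_unfold, pvB_unfold, pvB_char]
  unfold pvAexp
  rw [pvA_char (((PySem.Str.split? messages_text "\n").getD [])) [] PySem.Dict.empty]
  rw [pvMatch_map, List.nil_append]
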